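-- pv_equiv track=rewrite | github.com/haokanga/mooclet-engine | mooclet_engine/engine/policies.py | is_valid_action
-- ===== SOURCE A (Python) =====
-- def is_valid_action(action):
-- 	'''
-- 	checks whether an action is valid, meaning, no more than one vars under same category are assigned 1
-- 	'''
--
-- 	# Obtain labels for each action
-- 	keys = action.keys()
--
-- 	# Itterate over each action label
-- 	for cur_key in keys:
--
-- 			# Find the action labels with multiple levels
-- 		if '_' not in cur_key:
-- 			continue
-- 		value = 0
-- 		prefix = cur_key.rsplit('_',1)[0] + '_'
--
-- 			# Compute sum of action variable with multiple levels
-- 		for key in keys: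
-- 			if key.startswith(prefix):
-- 				value += action[key]
-- 			# Action not feasible if sum of indicators is more than 1
-- 		if value > 1:
-- 			return False
--
-- 	# Return true if action is valid
-- 	return True
-- ===== SOURCE B (Python) =====
-- def is_valid_action(action):
--     # One pass: accumulate indicator sums per category prefix into a dict,
--     # then check every prefix-group (including nested-category containment) sums to <= 1.
--     sums = {}
--     for key in action:
--         if '_' in key:
--             p = key.rsplit('_', 1)[0] + '_'
--             sums[p] = sums.get(p, 0) + action[key]
--     return all(sum(t for g, t in sums.items() if g.startswith(p)) <= 1
--                for p in sums)
-- ===== Notes on version B (the rewrite author's own statement) =====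
-- stated objective: alternative
-- what changed: A rescans every key of the dict once per key (recomputing the same prefix-group sum repeatedly, with an early return); B makes one grouping pass that accumulates the indicator sum of each distinct category prefix into a dict and then checks every prefix-group total (following prefix containment for nested categories) at most once.
import Mathlib
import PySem

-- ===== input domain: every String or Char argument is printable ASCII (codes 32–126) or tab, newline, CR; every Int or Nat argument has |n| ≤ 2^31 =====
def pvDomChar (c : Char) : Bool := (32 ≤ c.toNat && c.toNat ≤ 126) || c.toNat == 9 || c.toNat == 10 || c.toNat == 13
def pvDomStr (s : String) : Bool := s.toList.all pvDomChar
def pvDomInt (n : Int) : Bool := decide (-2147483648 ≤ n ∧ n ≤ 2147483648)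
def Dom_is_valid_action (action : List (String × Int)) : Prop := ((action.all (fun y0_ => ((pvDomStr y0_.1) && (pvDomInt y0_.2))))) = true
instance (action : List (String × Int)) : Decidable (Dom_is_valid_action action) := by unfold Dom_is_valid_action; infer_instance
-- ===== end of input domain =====

-- B replaces A's nested key-by-key rescans with one grouping pass into a prefix-sum dict
-- followed by a check over the (deduplicated) prefixes: alternative algorithm, same results.

-- ===== PORT A =====
-- key.rsplit('_', 1)[0] + '_' ; exact whenever '_' occurs in k (both programs only apply it then)
def pvPrefix (k : String) : String :=
  String.ofList (PySem.Chars.slice k.toList none (some (PySem.Chars.rfind k.toList ['_'])) ++ ['_'])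

def pvHasUnd (k : String) : Bool := PySem.Str.isIn "_" k

-- inner loop of A: value = sum of action[key] over keys starting with prefix
-- (action[key] never raises in A since key comes from action.keys(); getD 0 is exact there)
def pvSumA (d : PySem.Dict String Int) (keys : List String) (pre : String) : Int :=
  keys.foldl (fun value key =>
    if PySem.Str.startswith key pre then value + d.getD key 0 else value) 0

-- outer loop of A with its early return
def pvLoopA (d : PySem.Dict String Int) (keys : List String) : List String → Bool
  | [] => true
  | k :: rest =>
    if pvHasUnd k = false then pvLoopA d keys rest
    else if pvSumA d keys (pvPrefix k) > 1 then false
    else pvLoopA d keys rest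

def is_valid_action (action : List (String × Int)) : Bool :=
  let d := PySem.Dict.ofList action
  pvLoopA d d.keys d.keys

-- ===== PORT B =====
def is_valid_action_alt (action : List (String × Int)) : Bool :=
  let d := PySem.Dict.ofList action
  let sums := d.keys.foldl (fun s key =>
    if pvHasUnd key then s.insert (pvPrefix key) (s.getD (pvPrefix key) 0 + d.getD key 0)
    else s) PySem.Dict.empty
  sums.keys.all (fun p =>
    (sums.items.foldl (fun acc gt =>
      if PySem.Str.startswith gt.1 p then acc + gt.2 else acc) 0) ≤ 1)

-- ===== PRECONDITION & SPEC =====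
def Spec_is_valid_action (action : List (String × Int)) (out : Bool) : Prop := out = is_valid_action_alt action
instance (action : List (String × Int)) (out : Bool) : Decidable (Spec_is_valid_action action out) := by unfold Spec_is_valid_action; infer_instance

-- ===== CLAIM (what is proved, stated in full; the proofs are below) =====
def Claim_equal_is_valid_action : Prop := ∀ (action : List (String × Int)), Dom_is_valid_action action → Spec_is_valid_action action (is_valid_action action)

-- ===== LEMMAS AND PROOFS =====

-- equation lemmas for rfind.go
theorem pv_go_zero (s sub : List Char) :
    PySem.Chars.rfind.go s sub 0 = if sub.isPrefixOf s = true then 0 else -1 := rfl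

theorem pv_go_succ (s sub : List Char) (n : Nat) :
    PySem.Chars.rfind.go s sub (n+1) =
      if sub.isPrefixOf (s.drop (n+1)) = true then ((n+1 : Nat) : Int)
      else PySem.Chars.rfind.go s sub n := rfl

-- rfind.go: any occurrence position is a lower bound
theorem pv_go_ge (s sub : List Char) (n i : Nat) (hi : i ≤ n)
    (h : sub.isPrefixOf (s.drop i) = true) : (i : Int) ≤ PySem.Chars.rfind.go s sub n := by
  induction n with
  | zero =>
    have hz : i = 0 := Nat.le_zero.mp hi
    subst hz
    simp only [List.drop_zero] at h
    rw [pv_go_zero, if_pos h]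
    norm_num
  | succ m ih =>
    rw [pv_go_succ]
    split_ifs with hp
    · exact_mod_cast hi
    · rcases Nat.lt_or_ge i (m+1) with hlt | hge
      · exact ih (Nat.lt_succ_iff.mp hlt)
      · have : i = m + 1 := le_antisymm hi hge
        subst this
        exact absurd h hp

-- rfind.go: a nonnegative result points at an occurrence
theorem pv_go_prefix (s sub : List Char) (n : Nat)
    (h : 0 ≤ PySem.Chars.rfind.go s sub n) :
    sub.isPrefixOf (s.drop (PySem.Chars.rfind.go s sub n).toNat) = true := by
  induction n with
  | zero =>
    rw [pv_go_zero] at h ⊢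
    split_ifs at h ⊢ with hp
    · simpa using hp
    · norm_num at h
  | succ m ih =>
    rw [pv_go_succ] at h ⊢
    split_ifs at h ⊢ with hp
    · simpa using hp
    · exact ih h


-- a guarded accumulating foldl is the sum of the filtered values
theorem pvFoldlIfAdd {T : Type} (l : List T) (q : T → Bool) (f : T → Int) (a : Int) :
    l.foldl (fun acc x => if q x then acc + f x else acc) a
      = a + ((l.filter q).map f).sum := by
  induction l generalizing a with
  | nil => simp
  | cons x xs ih =>
    by_cases hx : q x = true
    · simp [hx, ih, add_assoc]
    · simp [hx, ih]

-- getD of a grouping fold: the sum of the values whose key maps to c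
theorem pvGroupGetD {T : Type} (l : List T) (K : T → String) (v : T → Int)
    (s0 : PySem.Dict String Int) (c : String) :
    (l.foldl (fun s x => s.insert (K x) (s.getD (K x) 0 + v x)) s0).getD c 0
      = s0.getD c 0 + ((l.filter (fun x => K x == c)).map v).sum := by
  induction l generalizing s0 with
  | nil => simp
  | cons x xs ih =>
    simp only [List.foldl_cons, ih, List.filter_cons]
    by_cases hx : K x = c
    · simp [hx, add_assoc]
    · simp [hx, PySem.Dict.getD_insert, Ne.symm hx]

-- summing an indicator over a Nodup list containing a
theorem pvSumIfSingle (G : List String) (c : String → Bool) (a : String) (w : Int)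
    (hG : G.Nodup) (ha : a ∈ G) :
    ((G.filter c).map (fun g => if a = g then w else 0)).sum = if c a then w else 0 := by
  induction G with
  | nil => cases ha
  | cons g G' ih =>
    rcases List.mem_cons.mp ha with rfl | hmem
    · have hnot : a ∉ G' := (List.nodup_cons.mp hG).1
      have hz : ((G'.filter c).map (fun g => if a = g then w else 0)).sum = 0 := by
        apply List.sum_eq_zero
        intro x hx
        rcases List.mem_map.mp hx with ⟨y, hy, rfl⟩
        have : y ≠ a := fun h => hnot (h ▸ List.mem_of_mem_filter hy)
        simp [Ne.symm this]
      by_cases hc : c a = true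
      · simp [hc, hz]
      · simp [hc, hz]
    · have hne : a ≠ g := fun h => (List.nodup_cons.mp hG).1 (h ▸ hmem)
      have := ih (List.nodup_cons.mp hG).2 hmem
      by_cases hc : c g = true
      · simp [hc, hne, this]
      · simp [hc, this]

-- partition identity: summing group sums over the distinct keys equals summing directly
theorem pvSumSwap {T : Type} (G : List String) (hG : G.Nodup) (F : List T)
    (K : T → String) (v : T → Int) (c : String → Bool)
    (hF : ∀ x ∈ F, K x ∈ G) :
    ((G.filter c).map (fun g => ((F.filter (fun x => K x == g)).map v).sum)).sum
      = ((F.filter (fun x => c (K x))).map v).sum := by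
  induction F with
  | nil => simp
  | cons x F' ih =>
    have hx : K x ∈ G := hF x List.mem_cons_self
    have ih' := ih (fun y hy => hF y (List.mem_cons_of_mem _ hy))
    have step : ∀ g : String,
        ((List.filter (fun y => K y == g) (x :: F')).map v).sum
          = (if K x = g then v x else 0) + ((F'.filter (fun y => K y == g)).map v).sum := by
      intro g
      by_cases h : K x = g
      · simp [h]
      · simp [h]
    have lhs_eq :
        ((G.filter c).map (fun g => ((List.filter (fun y => K y == g) (x :: F')).map v).sum)).sum
          = ((G.filter c).map (fun g => if K x = g then v x else 0)).sum
            + ((G.filter c).map (fun g => ((F'.filter (fun y => K y == g)).map v).sum)).sum := by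
      rw [← PySem.List.sum_map_add_int]
      congr 1
      apply List.map_congr_left
      intro g _
      rw [step g]
    rw [lhs_eq, ih', pvSumIfSingle G c (K x) (v x) hG hx]
    by_cases hc : c (K x) = true
    · simp [hc]
    · simp [hc]

-- facts about pvPrefix k when '_' occurs in k
theorem pvPrefix_facts (k : String) (h : pvHasUnd k = true) :
    ∃ r : Nat, (pvPrefix k).toList = k.toList.take r ++ ['_']
      ∧ ['_'] <+: k.toList.drop r
      ∧ ∀ i : Nat, ['_'] <+: k.toList.drop i → i ≤ r := by
  have hin : PySem.Chars.isIn ['_'] k.toList = true := by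
    have := (PySem.Str.isIn_iff_infix "_" k).mp h
    exact (PySem.Chars.isIn_iff_infix _ _).mpr (by simpa using this)
  have hex : ∃ j, ['_'] <+: k.toList.drop j :=
    (PySem.Chars.exists_prefix_drop_iff_isIn ['_'] k.toList).mpr hin
  have hboundall : ∀ i : Nat, ['_'] <+: k.toList.drop i → i ≤ k.toList.length := by
    intro i hi
    by_contra hgt
    have hnil : k.toList.drop i = [] := List.drop_eq_nil_of_le (by omega)
    rw [hnil] at hi
    exact absurd (List.prefix_nil.mp hi) (by simp)
  obtain ⟨j, hj⟩ := hex
  have hj_le : j ≤ k.toList.length := hboundall j hj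
  have hrfind : PySem.Chars.rfind k.toList ['_']
      = PySem.Chars.rfind.go k.toList ['_'] k.toList.length := rfl
  set r : Int := PySem.Chars.rfind k.toList ['_'] with hr
  have hr0 : 0 ≤ r := by
    have := pv_go_ge k.toList ['_'] k.toList.length j hj_le
      (List.isPrefixOf_iff_prefix.mpr hj)
    rw [← hrfind] at this
    exact le_trans (by positivity) this
  have hocc : ['_'] <+: k.toList.drop r.toNat := by
    have := pv_go_prefix k.toList ['_'] k.toList.length (hrfind ▸ hr0)
    rw [← hrfind] at this
    exact List.isPrefixOf_iff_prefix.mp this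
  refine ⟨r.toNat, ?_, hocc, ?_⟩
  · simp only [pvPrefix, PySem.Chars.slice_eq_listSlice, String.toList_ofList]
    rw [← hr, PySem.List.slice_to k.toList hr0]
  · intro i hi
    have hile : i ≤ k.toList.length := hboundall i hi
    have := pv_go_ge k.toList ['_'] k.toList.length i hile
      (List.isPrefixOf_iff_prefix.mpr hi)
    rw [← hrfind] at this
    omega

-- pvPrefix k is a prefix of k
theorem pvPrefix_prefix (k : String) (h : pvHasUnd k = true) :
    (pvPrefix k).toList <+: k.toList := by
  obtain ⟨r, hpre, hocc, _⟩ := pvPrefix_facts k h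
  obtain ⟨t, ht⟩ := hocc
  refine ⟨t, ?_⟩
  rw [hpre, List.append_assoc, ht, List.take_append_drop]

-- the key transfer fact: a category prefix p is a prefix of k iff it is a prefix of pvPrefix k
theorem pvStartswith_iff (k p : String) (hk : pvHasUnd k = true)
    (hp : ∃ q, p.toList = q ++ ['_']) :
    p.toList <+: k.toList ↔ p.toList <+: (pvPrefix k).toList := by
  obtain ⟨r, hpre, hocc, hmax⟩ := pvPrefix_facts k hk
  obtain ⟨q, hq⟩ := hp
  have hPk := pvPrefix_prefix k hk
  constructor
  · intro hpk
    obtain ⟨u, hu⟩ := hpk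
    have hdrop : ['_'] <+: k.toList.drop q.length := by
      rw [hq, List.append_assoc] at hu
      refine ⟨u, ?_⟩
      rw [← hu, List.drop_left]
    have hqr : q.length ≤ r := hmax q.length hdrop
    have hlen : p.toList.length ≤ (pvPrefix k).toList.length := by
      have hple : p.toList.length ≤ k.toList.length := List.IsPrefix.length_le ⟨u, hu⟩
      rw [hq] at hple ⊢
      rw [hpre]
      simp at hple ⊢
      omega
    exact List.prefix_of_prefix_length_le ⟨u, hu⟩ hPk hlen
  · intro hpp
    exact hpp.trans hPk

-- a prefix test against a category prefix forces '_' in the key and transfers to pvPrefix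
theorem pvStartCond (k p : String) (hp : ∃ q, p.toList = q ++ ['_']) :
    PySem.Str.startswith k p = (pvHasUnd k && PySem.Str.startswith (pvPrefix k) p) := by
  obtain ⟨q, hq⟩ := hp
  by_cases hk : pvHasUnd k = true
  · rw [hk, Bool.true_and, PySem.Str.startswith_eq, PySem.Str.startswith_eq]
    rw [Bool.eq_iff_iff, PySem.Chars.startswith_iff, PySem.Chars.startswith_iff]
    exact pvStartswith_iff k p hk ⟨q, hq⟩
  · rw [Bool.not_eq_true] at hk
    rw [hk, Bool.false_and]
    rw [PySem.Str.startswith_eq]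
    by_contra hne
    rw [Bool.not_eq_false, PySem.Chars.startswith_iff] at hne
    have : ['_'] <:+: k.toList := by
      rw [hq] at hne
      exact ((List.suffix_append q ['_']).isInfix).trans hne.isInfix
    have : pvHasUnd k = true := by
      unfold pvHasUnd
      rw [PySem.Str.isIn_iff_infix]
      simpa using this
    rw [hk] at this
    exact Bool.false_ne_true this

-- outer loop of A = an 'all' over the keys
theorem pvLoopA_eq (d : PySem.Dict String Int) (keys : List String) (l : List String) :
    pvLoopA d keys l
      = l.all (fun k => !pvHasUnd k || decide (pvSumA d keys (pvPrefix k) ≤ 1)) := by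
  induction l with
  | nil => rfl
  | cons k rest ih =>
    unfold pvLoopA
    by_cases hk : pvHasUnd k = true
    · by_cases hv : pvSumA d keys (pvPrefix k) > 1
      · have h1 : ¬ pvSumA d keys (pvPrefix k) ≤ 1 := by omega
        simp [hk, hv, h1]
      · have h1 : pvSumA d keys (pvPrefix k) ≤ 1 := by omega
        simp [hk, hv, ih, h1]
    · rw [Bool.not_eq_true] at hk
      simp [hk, ih]

-- ===== VERDICT (by name: the statement is the Claim_ definition above) =====
theorem is_valid_action_spec : Claim_equal_is_valid_action := by
  intro action _
  unfold Spec_is_valid_action is_valid_action is_valid_action_alt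
  dsimp only
  set d := PySem.Dict.ofList action with hd
  set keys := d.keys with hkeys
  have hnd : keys.Nodup := PySem.Dict.nodup_keys_ofList action
  set v : String → Int := fun k => d.getD k 0 with hv
  set F : List String := keys.filter pvHasUnd with hF
  have hfold : keys.foldl (fun s key =>
        if pvHasUnd key then s.insert (pvPrefix key) (s.getD (pvPrefix key) 0 + d.getD key 0)
        else s) PySem.Dict.empty
      = F.foldl (fun s key => s.insert (pvPrefix key) (s.getD (pvPrefix key) 0 + v key))
          PySem.Dict.empty := by
    rw [hF, List.foldl_filter]
  rw [hfold]
  set S := F.foldl (fun s key => s.insert (pvPrefix key) (s.getD (pvPrefix key) 0 + v key))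
      PySem.Dict.empty with hS
  have hSkeys : S.keys = PySem.Set.ofList (F.map pvPrefix) := by
    rw [hS, PySem.Dict.keys_foldl_insert_key F pvPrefix
      (fun s key => s.getD (pvPrefix key) 0 + v key) PySem.Dict.empty]
    rw [PySem.Set.ofList_eq_foldl]
    rfl
  have hmem : ∀ p, p ∈ S.keys ↔ ∃ k ∈ F, pvPrefix k = p := by
    intro p
    rw [hSkeys, PySem.Set.mem_ofList, List.mem_map]
  have hSnodup : S.keys.Nodup := by
    rw [hS]
    exact PySem.Dict.nodup_keys_foldl_insert_key F pvPrefix _ PySem.Dict.empty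
      PySem.Dict.nodup_keys_empty
  have hgetD : ∀ c, S.getD c 0 = ((F.filter (fun x => pvPrefix x == c)).map v).sum := by
    intro c
    rw [hS, pvGroupGetD F pvPrefix v PySem.Dict.empty c, PySem.Dict.getD_empty]
    ring
  have hprefixform : ∀ k, pvHasUnd k = true → ∃ q, (pvPrefix k).toList = q ++ ['_'] := by
    intro k hk
    obtain ⟨r, hpre, _, _⟩ := pvPrefix_facts k hk
    exact ⟨_, hpre⟩
  have hsumA : ∀ p, pvSumA d keys p
      = ((keys.filter (fun k => PySem.Str.startswith k p)).map v).sum := by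
    intro p
    rw [pvSumA, pvFoldlIfAdd keys (fun k => PySem.Str.startswith k p) v 0]
    ring
  have hfilter : ∀ p, (∃ q, p.toList = q ++ ['_']) →
      keys.filter (fun k => PySem.Str.startswith k p)
        = F.filter (fun k => PySem.Str.startswith (pvPrefix k) p) := by
    intro p hp
    rw [hF, List.filter_filter]
    apply List.filter_congr
    intro k _
    rw [pvStartCond k p hp, Bool.and_comm]
  have hinner : ∀ p, (∃ q, p.toList = q ++ ['_']) →
      S.items.foldl (fun acc gt =>
          if PySem.Str.startswith gt.1 p then acc + gt.2 else acc) 0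
        = pvSumA d keys p := by
    intro p hp
    rw [pvFoldlIfAdd S.items (fun gt => PySem.Str.startswith gt.1 p) (fun gt => gt.2) 0]
    rw [PySem.Dict.items_eq_map_keys S hSnodup 0]
    rw [List.filter_map, List.map_map]
    have hcomp : ((S.keys.filter ((fun gt => PySem.Str.startswith gt.1 p) ∘
          (fun k => (k, S.getD k 0)))).map ((fun gt : String × Int => gt.2) ∘
          (fun k => (k, S.getD k 0)))).sum
        = ((S.keys.filter (fun g => PySem.Str.startswith g p)).map
            (fun g => S.getD g 0)).sum := rfl
    rw [hcomp]
    have hrw : ((S.keys.filter (fun g => PySem.Str.startswith g p)).map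
          (fun g => S.getD g 0)).sum
        = ((S.keys.filter (fun g => PySem.Str.startswith g p)).map
            (fun g => ((F.filter (fun x => pvPrefix x == g)).map v).sum)).sum := by
      congr 1
      apply List.map_congr_left
      intro g _
      exact hgetD g
    rw [hrw]
    rw [pvSumSwap S.keys hSnodup F pvPrefix v (fun g => PySem.Str.startswith g p)
      (fun x hx => (hmem (pvPrefix x)).mpr ⟨x, hx, rfl⟩)]
    rw [hsumA p, hfilter p hp]
    ring
  rw [pvLoopA_eq d keys keys, Bool.eq_iff_iff]
  simp only [List.all_eq_true]
  constructor
  · intro hA p hpmem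
    obtain ⟨k0, hk0F, rfl⟩ := (hmem p).mp hpmem
    have hund : pvHasUnd k0 = true := List.of_mem_filter hk0F
    have h1 := hA k0 (List.mem_of_mem_filter hk0F)
    rw [hund] at h1
    simp only [Bool.not_true, Bool.false_or, decide_eq_true_eq] at h1
    rw [hinner (pvPrefix k0) (hprefixform k0 hund)]
    simpa using h1
  · intro hB k0 hk0
    by_cases hund : pvHasUnd k0 = true
    · have hpmem : pvPrefix k0 ∈ S.keys :=
        (hmem (pvPrefix k0)).mpr ⟨k0, List.mem_filter.mpr ⟨hk0, hund⟩, rfl⟩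
      have h1 := hB (pvPrefix k0) hpmem
      rw [hinner (pvPrefix k0) (hprefixform k0 hund)] at h1
      rw [hund]
      simpa using h1
    · rw [Bool.not_eq_true] at hund
      simp [hund]
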